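-- pv_equiv track=rewrite | github.com/ncrhynes/Assorted-Python-Work | Split List.py | listSplitPre
-- ===== SOURCE A (Python) =====
-- def listSplitPre(L, n):
--     M = []
--     for i in range(len(L)):
--         if L[i] == n:
--             break
--         else:
--             M.append(L[i])
--     return M
-- ===== SOURCE B (Python) =====
-- def listSplitPre(L, n):
--     try:
--         return L[:L.index(n)]
--     except ValueError:
--         return L[:]
-- ===== Notes on version B (the rewrite author's own statement) =====
-- stated objective: idiomatic
-- what changed: Replaces the explicit index loop with break and accumulator by locating the boundary with L.index(n) and returning the slice L[:idx] (whole copy when n is absent).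
import Mathlib
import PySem

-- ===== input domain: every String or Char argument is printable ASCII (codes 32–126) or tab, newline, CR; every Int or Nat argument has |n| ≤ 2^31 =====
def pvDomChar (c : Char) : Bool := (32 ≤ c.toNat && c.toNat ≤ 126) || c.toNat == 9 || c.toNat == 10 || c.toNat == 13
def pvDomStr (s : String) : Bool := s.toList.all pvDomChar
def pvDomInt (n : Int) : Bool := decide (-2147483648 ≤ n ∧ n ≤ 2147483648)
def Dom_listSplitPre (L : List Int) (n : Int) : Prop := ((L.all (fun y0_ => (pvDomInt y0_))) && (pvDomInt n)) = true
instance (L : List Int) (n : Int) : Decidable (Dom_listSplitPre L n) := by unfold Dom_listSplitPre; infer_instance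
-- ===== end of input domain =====

-- B replaces A's index loop with break by locate-then-slice: L[:L.index(n)], or a full copy when n is absent (idiomatic; same return value).


-- ===== PORT A =====
-- loop state of A: remaining suffix and accumulator M; break → return M
def listSplitPreLoop (n : Int) (rest : List Int) (M : List Int) : List Int :=
  match rest with
  | [] => M
  | x :: xs => if x = n then M else listSplitPreLoop n xs (M ++ [x])

def listSplitPre (L : List Int) (n : Int) : List Int :=
  listSplitPreLoop n L []

-- ===== PORT B =====
def listSplitPre_alt (L : List Int) (n : Int) : List Int :=
  match PySem.List.index? L n with
  | some i => PySem.List.slice L none (some (i : Int))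
  | none => L

-- ===== PRECONDITION & SPEC =====
def Spec_listSplitPre (L : List Int) (n : Int) (out : List Int) : Prop := out = listSplitPre_alt L n
instance (L : List Int) (n : Int) (out : List Int) : Decidable (Spec_listSplitPre L n out) := by unfold Spec_listSplitPre; infer_instance

-- ===== CLAIM (what is proved, stated in full; the proofs are below) =====
def Claim_equal_listSplitPre : Prop := ∀ (L : List Int) (n : Int), Dom_listSplitPre L n → Spec_listSplitPre L n (listSplitPre L n)

-- ===== LEMMAS AND PROOFS =====

-- ===== VERDICT (by name: the statement is the Claim_ definition above) =====
theorem loop_spec (n : Int) : ∀ (rest M : List Int),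
    listSplitPreLoop n rest M = M ++ listSplitPre_alt rest n := by
  intro rest
  induction rest with
  | nil => intro M; simp [listSplitPreLoop, listSplitPre_alt, PySem.List.index?]
  | cons x xs ih =>
    intro M
    by_cases hx : x = n
    · subst hx
      simp only [listSplitPreLoop, listSplitPre_alt, PySem.List.index?_eq_idxOf?,
        List.idxOf?_cons, BEq.rfl, if_true]
      rw [PySem.List.slice_to_natCast]
      simp
    · have hne : (x == n) = false := by simp [hx]
      simp only [listSplitPreLoop, if_neg hx, ih, listSplitPre_alt,
        PySem.List.index?_eq_idxOf?, List.idxOf?_cons, hne, Bool.false_eq_true,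
        if_false]
      cases h : List.idxOf? n xs with
      | none => simp
      | some i =>
        simp only [Option.map_some]
        rw [PySem.List.slice_to_natCast, PySem.List.slice_to_natCast,
          List.take_succ_cons]
        simp

theorem listSplitPre_spec : Claim_equal_listSplitPre := by
  intro L n _
  unfold Spec_listSplitPre listSplitPre
  simpa using loop_spec n L []
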